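-- pv_equiv track=rewrite | github.com/Lassenf95/Nr1_ING301_Lasse | wordfrequency.py | lines_to_words
-- ===== SOURCE A (Python) =====
-- def lines_to_words(lines):
-- #      """
-- #     Denne funksjonen får en liste med strenger som input (dvs. linjene av tekstfilen som har nettopp blitt lest inn)
-- #     og deler linjene opp i enkelte ord. Enhver linje blir delt opp der det er blanktegn (= whitespaces).
-- #     Desto videre er vi bare interessert i faktiske ord, dvs. alle punktum (.), kolon (:), semikolon (;),
-- #     kommaer (,), spørsmåls- (?) og utråbstegn (!) skal fjernes underveis.
-- #     Til sist skal alle ord i den resulterende listen være skrevet i små bokstav slik at "Odin" og "odin"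
-- #     blir behandlet likt.
-- #     OBS! Pass også på at du ikke legger til tomme ord (dvs. "" eller '' skal ikke være med) i resultatlisten!
--
-- #     F. eks: Inn: ["Det er", "bare", "noen få ord"], Ut: ["Det", "er", "bare", "noen", "få", "ord"]
-- #     """
-- #     #
--
--     EnStorString= '' #VIKTIG AT DENNE ER TOM; BYGGES BARE VIDERE PÅ
--     #bygger opp hele stringen før splitting og rensing , merk mellomrom legges slik at blir en lang setning
--     for alleLinjer in lines:
--         EnStorString += alleLinjer +' '
--
--     TEGN_JEG_VIL_FJERNE = ['-','-',',',';','!','?',':','.'] #RENSETIS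
--
--     #erstatter alle tegn og erstatter de med ingenting
--     for hvertElement in TEGN_JEG_VIL_FJERNE:
--         EnStorString = EnStorString.replace(hvertElement,'')
--
--     #får alt i lower case
--     EnStorString = EnStorString.lower() #Overskriver stringen med en ny string der alt ewr lite
--
--     #gjør om til liste igjen. splitter alt med mellomrom mellom seg
--     Resultatet = EnStorString.split()
--     return Resultatet
-- ===== SOURCE B (Python) =====
-- PUNCT = "-,;!?:."
--
-- def lines_to_words(lines):
--     words = []
--     for line in lines:
--         for token in line.split():
--             w = ''.join(ch for ch in token.lower() if ch not in PUNCT)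
--             if w:
--                 words.append(w)
--     return words
-- ===== Notes on version B (the rewrite author's own statement) =====
-- stated objective: idiomatic
-- what changed: Instead of concatenating all lines into one big string, running eight whole-string replace passes and splitting once at the end, B splits each line into tokens and cleans each token (lowercase + drop punctuation chars in one filtering pass), appending it only if non-empty.
import Mathlib
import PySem

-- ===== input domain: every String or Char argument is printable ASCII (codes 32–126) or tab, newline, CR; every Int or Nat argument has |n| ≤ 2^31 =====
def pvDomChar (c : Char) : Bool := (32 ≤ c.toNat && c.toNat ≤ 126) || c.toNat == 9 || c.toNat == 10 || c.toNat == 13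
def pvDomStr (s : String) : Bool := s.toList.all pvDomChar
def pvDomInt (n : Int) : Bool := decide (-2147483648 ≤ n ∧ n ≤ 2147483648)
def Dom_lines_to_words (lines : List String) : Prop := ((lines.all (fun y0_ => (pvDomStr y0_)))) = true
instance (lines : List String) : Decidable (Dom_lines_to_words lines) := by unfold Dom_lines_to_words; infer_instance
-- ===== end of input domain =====

-- B splits each line into tokens and cleans each token (lowercase, drop punctuation) in one pass,
-- instead of A's concatenate-everything / eight whole-string replace passes / one final split. (idiomatic)


-- ===== PORT A =====
def pvTegn : List String := ["-", "-", ",", ";", "!", "?", ":", "."]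

def lines_to_words (lines : List String) : List String :=
  let big := lines.foldl (fun acc l => acc ++ l ++ " ") ""
  let cleaned := pvTegn.foldl (fun s t => PySem.Str.replace s t "") big
  PySem.Str.split₀ (PySem.Str.lower cleaned)

-- ===== PORT B =====
def pvPunct : String := "-,;!?:."

-- ''.join(ch for ch in token.lower() if ch not in PUNCT); 'ch in PUNCT' for a single char is exactly membership of that char among PUNCT's chars
def pvCleanToken (token : String) : String :=
  String.ofList (((PySem.Str.lower token).toList).filter (fun ch => !(pvPunct.toList.contains ch)))

def lines_to_words_alt (lines : List String) : List String :=
  lines.foldl (fun words line =>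
    (PySem.Str.split₀ line).foldl (fun words token =>
      let w := pvCleanToken token
      if w ≠ "" then words ++ [w] else words) words) []

-- ===== PRECONDITION & SPEC =====
def Spec_lines_to_words (lines : List String) (out : List String) : Prop := out = lines_to_words_alt lines
instance (lines : List String) (out : List String) : Decidable (Spec_lines_to_words lines out) := by unfold Spec_lines_to_words; infer_instance

-- ===== CLAIM (what is proved, stated in full; the proofs are below) =====
def Claim_equal_lines_to_words : Prop := ∀ (lines : List String), Dom_lines_to_words lines → Spec_lines_to_words lines (lines_to_words lines)

-- ===== LEMMAS AND PROOFS =====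

-- the characters a word keeps (complement of the punctuation set)
def pvKeep : Char → Bool := fun c => !(pvPunct.toList.contains c)

-- per-token cleaning on the character level
def pvClean (t : List Char) : List Char := (PySem.Chars.lower t).filter pvKeep

-- reference whitespace splitter (cur = reversed pending token)
def wsplit : List Char → List Char → List (List Char)
  | cur, [] => if cur.isEmpty then [] else [cur.reverse]
  | cur, c :: rest =>
    if PySem.Chars.isspace c then
      (if cur.isEmpty then wsplit [] rest else cur.reverse :: wsplit [] rest)
    else wsplit (c :: cur) rest

theorem go_eq_wsplit (s cur : List Char) (acc : List (List Char)) :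
    PySem.Chars.split₀.go s cur acc = acc.reverse ++ wsplit cur s := by
  induction s generalizing cur acc with
  | nil => by_cases h : cur.isEmpty <;> simp [PySem.Chars.split₀.go, wsplit, h]
  | cons c rest ih =>
    by_cases hsp : PySem.Chars.isspace c <;> by_cases hc : cur.isEmpty <;>
      simp [PySem.Chars.split₀.go, wsplit, hsp, hc, ih]

theorem split₀_eq_wsplit (s : List Char) : PySem.Chars.split₀ s = wsplit [] s := by
  simp [PySem.Chars.split₀, go_eq_wsplit]

theorem char_eq_iff_toNat (a b : Char) : a = b ↔ a.toNat = b.toNat := by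
  constructor
  · rintro rfl; rfl
  · intro h; exact Char.ext (UInt32.toNat_inj.mp h)

theorem toNat_ofNat_valid (n : Nat) (h : n.isValidChar) : (Char.ofNat n).toNat = n := by
  unfold Char.ofNat Char.ofNatAux
  split
  · rfl
  · exact absurd h (by assumption)

theorem keep_of_codes (d : Char)
    (h : ¬ (d.toNat = 45 ∨ d.toNat = 44 ∨ d.toNat = 59 ∨ d.toNat = 33 ∨ d.toNat = 63 ∨
            d.toNat = 58 ∨ d.toNat = 46)) : pvKeep d = true := by
  simp only [pvKeep, show pvPunct.toList = ['-', ',', ';', '!', '?', ':', '.'] from rfl,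
    List.contains_eq_mem, List.mem_cons, Bool.not_eq_true',
    decide_eq_false_iff_not, List.not_mem_nil, or_false, char_eq_iff_toNat,
    show ('-').toNat = 45 from rfl, show (',').toNat = 44 from rfl, show (';').toNat = 59 from rfl,
    show ('!').toNat = 33 from rfl, show ('?').toNat = 63 from rfl, show (':').toNat = 58 from rfl,
    show ('.').toNat = 46 from rfl]
  omega

theorem lowerChar_toNat (c : Char) (h : PySem.Chars.isupper c = true) :
    (PySem.Chars.lowerChar c).toNat = c.toNat + 32 ∧ 65 ≤ c.toNat ∧ c.toNat ≤ 90 := by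
  have hr : 65 ≤ c.toNat ∧ c.toNat ≤ 90 := by
    simp [PySem.Chars.isupper, Char.le_def, UInt32.le_iff_toNat_le] at h
    exact ⟨h.1, h.2⟩
  refine ⟨?_, hr⟩
  simp only [PySem.Chars.lowerChar, h, if_true]
  exact toNat_ofNat_valid _ (Or.inl (by omega))

theorem isspace_lowerChar (c : Char) :
    PySem.Chars.isspace (PySem.Chars.lowerChar c) = PySem.Chars.isspace c := by
  by_cases h : PySem.Chars.isupper c
  · obtain ⟨h1, h2, h3⟩ := lowerChar_toNat c h
    have a : PySem.Chars.isspace c = false := by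
      simp only [PySem.Chars.isspace, Bool.or_eq_false_iff, Bool.and_eq_false_iff,
        decide_eq_false_iff_not]
      omega
    have b : PySem.Chars.isspace (PySem.Chars.lowerChar c) = false := by
      simp only [PySem.Chars.isspace, h1, Bool.or_eq_false_iff, Bool.and_eq_false_iff,
        decide_eq_false_iff_not]
      omega
    rw [a, b]
  · simp [PySem.Chars.lowerChar, h]

theorem keep_lowerChar (c : Char) : pvKeep (PySem.Chars.lowerChar c) = pvKeep c := by
  by_cases h : PySem.Chars.isupper c
  · obtain ⟨h1, h2, h3⟩ := lowerChar_toNat c h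
    rw [keep_of_codes c (by omega), keep_of_codes _ (by omega)]
  · simp [PySem.Chars.lowerChar, h]

theorem keep_of_isspace (c : Char) (h : PySem.Chars.isspace c = true) : pvKeep c = true := by
  simp only [PySem.Chars.isspace, Bool.or_eq_true, Bool.and_eq_true, decide_eq_true_eq] at h
  exact keep_of_codes c (by omega)

theorem replace_go_single (c : Char) (l acc : List Char) (fuel : Nat) (hf : l.length ≤ fuel) :
    PySem.Chars.replace.go [c] [] fuel l acc = acc.reverse ++ l.filter (fun d => !(d == c)) := by
  induction l generalizing fuel acc with
  | nil => cases fuel <;> simp [PySem.Chars.replace.go]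
  | cons d t ih =>
    cases fuel with
    | zero => simp at hf
    | succ fuel =>
      simp only [List.length_cons, Nat.succ_le_succ_iff] at hf
      by_cases hd : c = d
      · subst hd
        rw [show PySem.Chars.replace.go [c] [] (fuel+1) (c :: t) acc
              = PySem.Chars.replace.go [c] [] fuel t acc from by
            simp [PySem.Chars.replace.go, List.isPrefixOf]]
        rw [ih acc fuel hf]
        simp
      · rw [show PySem.Chars.replace.go [c] [] (fuel+1) (d :: t) acc
              = PySem.Chars.replace.go [c] [] fuel t (d :: acc) from by
            simp [PySem.Chars.replace.go, List.isPrefixOf, hd]]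
        rw [ih (d :: acc) fuel hf]
        simp [Ne.symm hd]

theorem replace_single (c : Char) (s : List Char) :
    PySem.Chars.replace s [c] [] = s.filter (fun d => !(d == c)) := by
  simp [PySem.Chars.replace]
  exact replace_go_single c s [] s.length (le_refl _)

-- the eight replace passes together keep exactly the non-punctuation characters
theorem foldl_replace_toList (s : String) :
    (pvTegn.foldl (fun s t => PySem.Str.replace s t "") s).toList = s.toList.filter pvKeep := by
  simp only [pvTegn, List.foldl_cons, List.foldl_nil, PySem.Str.replace, String.toList_ofList,
    show ("" : String).toList = [] from rfl,
    show ("-" : String).toList = ['-'] from rfl, show ("," : String).toList = [','] from rfl,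
    show (";" : String).toList = [';'] from rfl, show ("!" : String).toList = ['!'] from rfl,
    show ("?" : String).toList = ['?'] from rfl, show (":" : String).toList = [':'] from rfl,
    show ("." : String).toList = ['.'] from rfl, replace_single, List.filter_filter]
  apply List.filter_congr
  intro c _
  simp only [pvKeep, show pvPunct.toList = ['-', ',', ';', '!', '?', ':', '.'] from rfl,
    List.contains_eq_mem, List.mem_cons, List.not_mem_nil, or_false]
  by_cases h1 : c = '-' <;> by_cases h2 : c = ',' <;> by_cases h3 : c = ';' <;>
    by_cases h4 : c = '!' <;> by_cases h5 : c = '?' <;> by_cases h6 : c = ':' <;>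
    by_cases h7 : c = '.' <;> simp [h1, h2, h3, h4, h5, h6, h7]

-- lowercasing commutes with the punctuation filter
theorem lower_filter_keep (t : List Char) :
    PySem.Chars.lower (t.filter pvKeep) = (PySem.Chars.lower t).filter pvKeep := by
  simp only [PySem.Chars.lower, List.filter_map]
  congr 1
  apply List.filter_congr
  intro c _
  exact (keep_lowerChar c).symm

-- split distributes over a space separator
theorem wsplit_append (a b cur : List Char) :
    wsplit cur (a ++ ' ' :: b) = wsplit cur a ++ wsplit [] b := by
  induction a generalizing cur with
  | nil =>
    by_cases hc : cur.isEmpty <;> simp [wsplit, hc, show PySem.Chars.isspace ' ' = true by decide]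
  | cons c a ih =>
    by_cases hsp : PySem.Chars.isspace c <;> by_cases hc : cur.isEmpty <;>
      simp [wsplit, hsp, hc, ih]

theorem wsplit_flatten (ls : List (List Char)) :
    wsplit [] (List.flatten (ls.map (fun l => l ++ [' ']))) = ls.flatMap (fun l => wsplit [] l) := by
  induction ls with
  | nil => simp [wsplit]
  | cons l ls ih =>
    simp only [List.map_cons, List.flatten_cons, List.flatMap_cons, List.append_assoc,
      List.singleton_append]
    rw [wsplit_append, ih]

theorem wsplit_lower (s cur : List Char) :
    wsplit (PySem.Chars.lower cur) (PySem.Chars.lower s)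
      = (wsplit cur s).map PySem.Chars.lower := by
  induction s generalizing cur with
  | nil =>
    by_cases hc : cur.isEmpty <;>
      simp_all [wsplit, PySem.Chars.lower, List.isEmpty_iff, List.map_reverse]
  | cons c s ih =>
    by_cases hsp : PySem.Chars.isspace c <;> by_cases hc : cur.isEmpty
    · simpa [wsplit, PySem.Chars.lower, isspace_lowerChar c, hsp, List.isEmpty_iff.mp hc]
        using ih []
    · have hc' : cur ≠ [] := by simpa [List.isEmpty_iff] using hc
      simpa [wsplit, PySem.Chars.lower, isspace_lowerChar c, hsp, hc', List.isEmpty_iff,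
        List.map_reverse] using ih []
    · simpa [wsplit, PySem.Chars.lower, isspace_lowerChar c, hsp, List.isEmpty_iff.mp hc]
        using ih [c]
    · simpa [wsplit, PySem.Chars.lower, isspace_lowerChar c, hsp] using ih (c :: cur)

theorem wsplit_filter (s cur : List Char) :
    wsplit (cur.filter pvKeep) (s.filter pvKeep)
      = ((wsplit cur s).map (List.filter pvKeep)).filter (fun w => !w.isEmpty) := by
  induction s generalizing cur with
  | nil =>
    by_cases hc : cur.isEmpty
    · simp_all [wsplit, List.isEmpty_iff]
    · have hc' : cur ≠ [] := by simpa [List.isEmpty_iff] using hc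
      by_cases hf : cur.filter pvKeep = [] <;>
        simp [wsplit, hc', hf, List.isEmpty_iff, List.filter_reverse]
  | cons c s ih =>
    by_cases hsp : PySem.Chars.isspace c
    · have hkc := keep_of_isspace c hsp
      have hstep : (c :: s).filter pvKeep = c :: s.filter pvKeep := by simp [hkc]
      rw [hstep]
      by_cases hc : cur.isEmpty
      · rw [List.isEmpty_iff.mp hc]
        simpa [wsplit, hsp] using ih []
      · have hc' : cur ≠ [] := by simpa [List.isEmpty_iff] using hc
        by_cases hf : cur.filter pvKeep = [] <;>
          · simp [wsplit, hsp, hf, hc', List.isEmpty_iff, List.filter_reverse]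
            simpa using ih ([] : List Char)
    · by_cases hk : pvKeep c
      · have h1 : (c :: s).filter pvKeep = c :: s.filter pvKeep := by simp [hk]
        have h2 : c :: cur.filter pvKeep = (c :: cur).filter pvKeep := by simp [hk]
        rw [h1]
        simp only [wsplit, hsp, Bool.false_eq_true, if_false]
        rw [h2, ih (c :: cur)]
      · have h1 : (c :: s).filter pvKeep = s.filter pvKeep := by simp [hk]
        have h2 : cur.filter pvKeep = (c :: cur).filter pvKeep := by simp [hk]
        rw [h1, h2, ih (c :: cur)]
        simp only [wsplit, hsp, Bool.false_eq_true, if_false]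

theorem toList_foldl_big (lines : List String) (s : String) :
    (lines.foldl (fun acc l => acc ++ l ++ " ") s).toList
      = s.toList ++ List.flatten (lines.map (fun l => l.toList ++ [' '])) := by
  induction lines generalizing s with
  | nil => simp
  | cons l ls ih => simp [ih, String.toList_append]

-- B as a flatMap over lines of cleaned non-empty tokens, on the character level
theorem alt_eq_chars (lines : List String) :
    lines_to_words_alt lines
      = (lines.flatMap (fun line =>
          ((wsplit [] line.toList).map pvClean).filter (fun w => !w.isEmpty))).map
            String.ofList := by
  unfold lines_to_words_alt
  have hinner : ∀ (line : String) (ws : List String),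
      (PySem.Str.split₀ line).foldl (fun words token =>
        let w := pvCleanToken token
        if w ≠ "" then words ++ [w] else words) ws
      = ws ++ (((wsplit [] line.toList).map pvClean).filter (fun w => !w.isEmpty)).map
          String.ofList := by
    intro line ws
    have hfun : (fun (words : List String) token =>
        let w := pvCleanToken token
        if w ≠ "" then words ++ [w] else words)
      = (fun words token =>
        if (fun t => !((pvCleanToken t).toList.isEmpty)) token = true
        then words ++ [(fun t => pvCleanToken t) token] else words) := by
      funext words token
      by_cases h : pvCleanToken token = "" <;>
        simp [h, show ("" : String).toList = [] from rfl]
    rw [hfun, PySem.List.foldl_append_if]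
    congr 1
    unfold PySem.Str.split₀
    rw [split₀_eq_wsplit, List.filter_map, List.map_map, List.filter_map, List.map_map]
    have hct : ∀ w : List Char, pvCleanToken (String.ofList w) = String.ofList (pvClean w) := by
      intro w
      simp only [pvCleanToken, pvClean, PySem.Str.lower, String.toList_ofList]
      rfl
    simp only [Function.comp_def, hct, String.toList_ofList]
  have houter : ∀ ws : List String,
      lines.foldl (fun words line =>
        (PySem.Str.split₀ line).foldl (fun words token =>
          let w := pvCleanToken token
          if w ≠ "" then words ++ [w] else words) words) ws
      = ws ++ (lines.flatMap (fun line =>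
          ((wsplit [] line.toList).map pvClean).filter (fun w => !w.isEmpty))).map
            String.ofList := by
    intro ws
    induction lines generalizing ws with
    | nil => simp
    | cons l ls ih =>
      rw [List.foldl_cons, hinner l ws, ih]
      simp [List.map_append]
  simpa using houter []

-- A on the character level
theorem a_eq_chars (lines : List String) :
    lines_to_words lines
      = (wsplit [] (List.filter pvKeep
          (List.flatten (lines.map (fun l => (PySem.Chars.lower l.toList) ++ [' ']))))).map
            String.ofList := by
  have e0 : lines_to_words lines
      = (PySem.Chars.split₀ ((PySem.Str.lower
          (pvTegn.foldl (fun s t => PySem.Str.replace s t "")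
            (lines.foldl (fun acc l => acc ++ l ++ " ") ""))).toList)).map String.ofList := rfl
  rw [e0, split₀_eq_wsplit]
  apply congrArg (List.map String.ofList)
  apply congrArg (wsplit [])
  have h1 : (PySem.Str.lower
      (pvTegn.foldl (fun s t => PySem.Str.replace s t "")
        (lines.foldl (fun acc l => acc ++ l ++ " ") ""))).toList
      = PySem.Chars.lower
          ((List.flatten (lines.map (fun l => l.toList ++ [' ']))).filter pvKeep) := by
    simp [PySem.Str.lower, String.toList_ofList, foldl_replace_toList, toList_foldl_big]
  rw [h1, lower_filter_keep]
  apply congrArg (List.filter pvKeep)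
  simp only [PySem.Chars.lower, List.map_flatten, List.map_map]
  apply congrArg List.flatten
  apply List.map_congr_left
  intro l _
  simp [show PySem.Chars.lowerChar ' ' = ' ' from rfl]

-- the character-level equivalence
theorem main_chars (lines : List String) :
    wsplit [] (List.filter pvKeep
      (List.flatten (lines.map (fun l => (PySem.Chars.lower l.toList) ++ [' ']))))
    = lines.flatMap (fun line =>
        ((wsplit [] line.toList).map pvClean).filter (fun w => !w.isEmpty)) := by
  have hsp : pvKeep ' ' = true := by decide
  have h1 : List.filter pvKeep
      (List.flatten (lines.map (fun l => (PySem.Chars.lower l.toList) ++ [' '])))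
      = List.flatten (lines.map (fun l =>
          ((PySem.Chars.lower l.toList).filter pvKeep) ++ [' '])) := by
    rw [List.filter_flatten]
    congr 1
    rw [List.map_map]
    apply List.map_congr_left
    intro l _
    simp [List.filter_append, hsp]
  rw [h1]
  have h2 := wsplit_flatten (lines.map (fun l => (PySem.Chars.lower l.toList).filter pvKeep))
  rw [List.map_map, List.flatMap_def, List.map_map] at h2
  simp only [Function.comp_def] at h2
  rw [h2, List.flatMap_def]
  congr 1
  apply List.map_congr_left
  intro l _
  have hf := wsplit_filter (PySem.Chars.lower l.toList) []
  rw [List.filter_nil] at hf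
  have hl := wsplit_lower l.toList []
  rw [show PySem.Chars.lower [] = [] from rfl] at hl
  rw [hf, hl, List.map_map]
  rfl

-- ===== VERDICT (by name: the statement is the Claim_ definition above) =====
theorem lines_to_words_spec : Claim_equal_lines_to_words := by
  intro lines _
  unfold Spec_lines_to_words
  rw [a_eq_chars, alt_eq_chars, main_chars]
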